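-- pv_equiv track=rewrite | github.com/liamwhite/Derpibooru-dl | sort_dl_list.py | artists_at_top
-- ===== SOURCE A (Python) =====
-- def artists_at_top(query_list):
--     """Put anything with the string "artist" at the top of the list"""
--     put_at_top = []
--     put_at_bottom = []
--     for query in query_list:
--         if "artist".lower() in query.lower():
--             put_at_top.append(query)
--         else:
--             put_at_bottom.append(query)
--     output_list = put_at_top + put_at_bottom
--     return output_list
-- ===== SOURCE B (Python) =====
-- def artists_at_top(query_list):
--     """Put anything with the string "artist" at the top of the list"""
--     return sorted(query_list, key=lambda query: "artist" not in query.lower())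
-- ===== Notes on version B (the rewrite author's own statement) =====
-- stated objective: idiomatic
-- what changed: Replaces the two explicit accumulator lists and the final concatenation with a single stable-sort call keyed on a boolean, relying on sort stability to preserve relative order within each group.
import Mathlib
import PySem

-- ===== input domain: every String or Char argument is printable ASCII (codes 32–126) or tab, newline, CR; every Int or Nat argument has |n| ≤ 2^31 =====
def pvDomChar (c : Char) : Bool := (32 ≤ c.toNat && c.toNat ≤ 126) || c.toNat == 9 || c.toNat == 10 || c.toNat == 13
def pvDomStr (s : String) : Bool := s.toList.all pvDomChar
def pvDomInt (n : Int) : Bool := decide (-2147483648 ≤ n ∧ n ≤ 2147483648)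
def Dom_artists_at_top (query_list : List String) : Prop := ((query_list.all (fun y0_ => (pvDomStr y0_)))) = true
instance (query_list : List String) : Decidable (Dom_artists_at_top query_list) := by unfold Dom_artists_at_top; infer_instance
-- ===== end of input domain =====

-- of A's two append-accumulator lists, B is one stable sort keyed on a Bool (idiomatic; same values proved below)


-- ===== PORT A =====
-- literal port: two accumulator lists built by append, then concatenated
def artists_at_top (query_list : List String) : List String :=
  let acc := query_list.foldl
    (fun (acc : List String × List String) query =>
      if PySem.Str.isIn (PySem.Str.lower "artist") (PySem.Str.lower query) then
        (acc.1 ++ [query], acc.2)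
      else
        (acc.1, acc.2 ++ [query]))
    ([], [])
  acc.1 ++ acc.2

-- ===== PORT B =====
-- literal port of Source B: one stable sort, key = "artist" not in query.lower()
def artists_at_top_alt (query_list : List String) : List String :=
  PySem.List.sorted query_list
    (fun query => !(PySem.Str.isIn "artist" (PySem.Str.lower query))) false

-- ===== PRECONDITION & SPEC =====
def Spec_artists_at_top (query_list : List String) (out : List String) : Prop := out = artists_at_top_alt query_list
instance (query_list : List String) (out : List String) : Decidable (Spec_artists_at_top query_list out) := by unfold Spec_artists_at_top; infer_instance

-- ===== CLAIM (what is proved, stated in full; the proofs are below) =====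
def Claim_equal_artists_at_top : Prop := ∀ (query_list : List String), Dom_artists_at_top query_list → Spec_artists_at_top query_list (artists_at_top query_list)

-- ===== LEMMAS AND PROOFS =====

-- the membership predicate both ports decide ("artist".lower() == "artist")
theorem lower_artist : PySem.Str.lower "artist" = "artist" := by decide

-- A's loop: final accumulators are the two filters, appended behind the start values
theorem foldlA_eq_filter (p : String → Bool) :
    ∀ (xs : List String) (t b : List String),
      xs.foldl (fun (acc : List String × List String) q =>
          if p q then (acc.1 ++ [q], acc.2) else (acc.1, acc.2 ++ [q])) (t, b)
        = (t ++ xs.filter p, b ++ xs.filter (fun q => !p q)) := by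
  intro xs
  induction xs with
  | nil => intro t b; simp
  | cons x xs ih =>
    intro t b
    by_cases hx : p x = true <;>
      simp [List.foldl_cons, hx, ih]

-- insertBy walks past every element it is not 'before'
theorem insertBy_append_of_not_before {α : Type} (before : α → α → Bool) (x : α)
    (t b : List α) (h : ∀ y ∈ t, before x y = false) :
    PySem.List.insertBy before x (t ++ b) = t ++ PySem.List.insertBy before x b := by
  induction t with
  | nil => simp
  | cons y t ih =>
    have hy : before x y = false := h y (by simp)
    simp [PySem.List.insertBy, hy, ih (fun z hz => h z (by simp [hz]))]

-- insertBy past a whole list it is nowhere 'before' lands at the end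
theorem insertBy_end_of_not_before {α : Type} (before : α → α → Bool) (x : α)
    (t : List α) (h : ∀ y ∈ t, before x y = false) :
    PySem.List.insertBy before x t = t ++ [x] := by
  induction t with
  | nil => simp [PySem.List.insertBy]
  | cons y t ih =>
    have hy : before x y = false := h y (by simp)
    simp [PySem.List.insertBy, hy, ih (fun z hz => h z (by simp [hz]))]

-- insertBy goes to the front of a list it is 'before' everywhere (or an empty one)
theorem insertBy_cons_of_before {α : Type} (before : α → α → Bool) (x : α)
    (b : List α) (h : ∀ y ∈ b, before x y = true) :
    PySem.List.insertBy before x b = x :: b := by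
  cases b with
  | nil => simp [PySem.List.insertBy]
  | cons y b =>
    have hy : before x y = true := h y (by simp)
    simp [PySem.List.insertBy, hy]

-- the stable insertion-sort loop on the Bool key keeps the two filter blocks
theorem foldl_insert_part (p : String → Bool) :
    ∀ (xs ys : List String),
      xs.foldl (fun acc x =>
          PySem.List.insertBy (fun a b => decide ((!p a) < (!p b))) x acc)
        (ys.filter p ++ ys.filter (fun q => !p q))
        = (ys ++ xs).filter p ++ (ys ++ xs).filter (fun q => !p q) := by
  intro xs
  induction xs with
  | nil => intro ys; simp
  | cons x xs ih =>
    intro ys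
    have step :
        PySem.List.insertBy (fun a b => decide ((!p a) < (!p b))) x
            (ys.filter p ++ ys.filter (fun q => !p q))
          = (ys ++ [x]).filter p ++ (ys ++ [x]).filter (fun q => !p q) := by
      by_cases hx : p x = true
      · rw [insertBy_append_of_not_before _ _ _ _
              (fun y hy => by
                have : p y = true := List.of_mem_filter hy
                simp [hx, this]),
            insertBy_cons_of_before _ _ _
              (fun y hy => by
                have : p y = false := by
                  have := (List.mem_filter.mp hy).2; simpa using this
                simp [hx, this])]
        simp [List.filter_append, hx]
      · rw [insertBy_end_of_not_before _ _
              (ys.filter p ++ ys.filter (fun q => !p q))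
              (fun y hy => by
                rcases List.mem_append.mp hy with h | h
                · have : p y = true := (List.mem_filter.mp h).2
                  simp [hx, this]
                · have : p y = false := by
                    have := (List.mem_filter.mp h).2; simpa using this
                  simp [hx, this])]
        simp [List.filter_append, hx]
    calc (x :: xs).foldl _ _
        = xs.foldl (fun acc x =>
            PySem.List.insertBy (fun a b => decide ((!p a) < (!p b))) x acc)
            ((ys ++ [x]).filter p ++ (ys ++ [x]).filter (fun q => !p q)) := by
          rw [List.foldl_cons, step]
      _ = ((ys ++ [x]) ++ xs).filter p ++ ((ys ++ [x]) ++ xs).filter (fun q => !p q) := ih _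
      _ = (ys ++ x :: xs).filter p ++ (ys ++ x :: xs).filter (fun q => !p q) := by
          simp

-- B equals filter-true ++ filter-false on the shared predicate
theorem alt_eq_filters (xs : List String) :
    artists_at_top_alt xs
      = xs.filter (fun q => PySem.Str.isIn "artist" (PySem.Str.lower q))
        ++ xs.filter (fun q => !(PySem.Str.isIn "artist" (PySem.Str.lower q))) := by
  unfold artists_at_top_alt
  rw [PySem.List.sorted_eq_foldl_insertBy]
  simpa using foldl_insert_part (fun q => PySem.Str.isIn "artist" (PySem.Str.lower q)) xs []

-- ===== VERDICT (by name: the statement is the Claim_ definition above) =====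
theorem artists_at_top_spec : Claim_equal_artists_at_top := by
  intro xs _
  show artists_at_top xs = artists_at_top_alt xs
  unfold artists_at_top
  rw [lower_artist, alt_eq_filters,
      foldlA_eq_filter (fun q => PySem.Str.isIn "artist" (PySem.Str.lower q)) xs [] []]
  simp
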